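-- pv_equiv track=rewrite | github.com/FireShade3DS/whitvm | src/whitvm/minifier.py | _build_var_map
-- ===== SOURCE A (Python) =====
-- from typing import Union, Dict, Any
--
-- def _build_var_map(lines: list) -> Dict[str, str]:
--     """Build a mapping of variable names to shorter names
--
--     Collects all variables and assigns them short names (a, b, c, etc.)
--     """
--     variables = set()
--
--     for line in lines:
--         # Find all variables in the line
--         i = 0
--         while i < len(line):
--             if line[i] == '*' and i + 1 < len(line) and (line[i+1].isalnum() or line[i+1] == '_'):
--                 end = line.find('*', i + 1)
--                 if end != -1:
--                     var_name = line[i+1:end]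
--                     variables.add(var_name)
--                     i = end + 1
--                 else:
--                     break
--             else:
--                 i += 1
--
--     # Create mapping: long names to short names
--     var_map = {}
--     short_names = [chr(ord('a') + i) for i in range(26)]  # a-z
--
--     # Add more names if needed: aa, ab, ac, etc.
--     if len(variables) > 26:
--         for i in range(len(variables) - 26):
--             short_names.append(f'a{chr(ord("a") + i)}')
--
--     for i, var_name in enumerate(sorted(variables)):
--         if i < len(short_names):
--             var_map[var_name] = short_names[i]
--
--     return var_map
-- ===== SOURCE B (Python) =====
-- def _build_var_map(lines: list) -> dict:
--     """Single split('*') pass per line plus a closed-form short-name formula."""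
--     variables = set()
--     for line in lines:
--         tokens = line.split('*')
--         j = 1
--         while j < len(tokens):
--             t = tokens[j]
--             if t and (t[0].isalnum() or t[0] == '_'):
--                 if j + 1 < len(tokens):
--                     variables.add(t)
--                 j += 2
--             else:
--                 j += 1
--     def short(i):
--         return chr(97 + i) if i < 26 else 'a' + chr(97 + i - 26)
--     return {v: short(i) for i, v in enumerate(sorted(variables))}
-- ===== Notes on version B (the rewrite author's own statement) =====
-- stated objective: faster
-- what changed: B replaces A's character-by-character while-loop with manual index bookkeeping and repeated str.find calls by one split('*') pass per line walked token-wise, and replaces A's materialised short-name list (a-z plus conditional extras) and the guarded enumerate lookup by a closed-form index-to-short-name formula.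
import Mathlib
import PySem

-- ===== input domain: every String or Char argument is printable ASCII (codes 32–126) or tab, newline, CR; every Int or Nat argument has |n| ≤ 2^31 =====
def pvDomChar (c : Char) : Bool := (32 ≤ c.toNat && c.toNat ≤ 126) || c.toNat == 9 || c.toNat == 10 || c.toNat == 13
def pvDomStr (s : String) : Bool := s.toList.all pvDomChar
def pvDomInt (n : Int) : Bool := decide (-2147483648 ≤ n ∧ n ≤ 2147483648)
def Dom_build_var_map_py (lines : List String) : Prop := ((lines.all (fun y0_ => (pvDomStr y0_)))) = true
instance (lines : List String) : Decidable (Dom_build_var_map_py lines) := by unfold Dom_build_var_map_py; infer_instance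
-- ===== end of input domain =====

-- B replaces A's index-based while/find scanner by one split('*') pass per line and the
-- short-name list by a closed-form formula (measured constant-factor speedup; same asymptotics).

-- ===== PORT A =====
-- 'i+1 < len(line) and (line[i+1].isalnum() or line[i+1] == "_")' seen from the suffix after position i
def qualA : List Char → Bool
  | [] => false
  | d :: _ => PySem.Chars.isalnum d || d == '_'

-- the while-loop over i, as recursion on the suffix line[i:]
def scanA : List Char → PySem.Set String → PySem.Set String
  | [], vars => vars
  | c :: rest, vars =>
    if c == '*' && qualA rest then
      -- end = line.find('*', i + 1)
      let e := PySem.Chars.find rest ['*']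
      if e == -1 then vars  -- break
      else scanA (rest.drop (e.toNat + 1)) (PySem.Set.add vars (String.ofList (rest.take e.toNat)))
    else scanA rest vars
termination_by cs => cs.length
decreasing_by
  · simp only [List.length_cons, List.length_drop]
    omega
  · simp

def build_var_map_py (lines : List String) : List (String × String) :=
  let vars_ : PySem.Set String := lines.foldl (fun vars line => scanA line.toList vars) PySem.Set.empty
  let short0 : List String := (List.range 26).map (fun j => String.ofList [Char.ofNat (97 + j)])
  let short_names : List String :=
    if PySem.Set.len vars_ > 26 then
      short0 ++ (List.range ((PySem.Set.len vars_ - 26).toNat)).map (fun j => String.ofList ['a', Char.ofNat (97 + j)])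
    else short0
  ((PySem.List.enumerate (PySem.List.sorted vars_ (fun x => x) false) 0).foldl
    (fun d p => if p.1 < (short_names.length : Int) then PySem.Dict.insert d p.2 (PySem.List.pyGetD short_names p.1 "") else d)
    PySem.Dict.empty).items

-- ===== PORT B =====
-- 't and (t[0].isalnum() or t[0] == "_")'
def qualB : List Char → Bool
  | [] => false
  | d :: _ => PySem.Chars.isalnum d || d == '_'

-- the while-loop over j on tokens[1:]: j += 2 when a name is taken, j += 1 otherwise
def collectB : List (List Char) → PySem.Set String → PySem.Set String
  | [], s => s
  | [_], s => s
  | t :: u :: rest, s =>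
    if qualB t then collectB rest (PySem.Set.add s (String.ofList t))
    else collectB (u :: rest) s
termination_by ts => ts.length
decreasing_by all_goals simp

def shortB (i : Int) : String :=
  if i < 26 then String.ofList [Char.ofNat (97 + i).toNat]
  else String.ofList ['a', Char.ofNat (97 + i - 26).toNat]

def build_var_map_py_alt (lines : List String) : List (String × String) :=
  let vars_ : PySem.Set String := lines.foldl
    (fun s line =>
      match PySem.Chars.splitOn line.toList ['*'] with
      | [] => s
      | _ :: cands => collectB cands s)
    PySem.Set.empty
  ((PySem.List.enumerate (PySem.List.sorted vars_ (fun x => x) false) 0).foldl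
    (fun d p => PySem.Dict.insert d p.2 (shortB p.1)) PySem.Dict.empty).items

-- ===== PRECONDITION & SPEC =====
def Spec_build_var_map_py (lines : List String) (out : List (String × String)) : Prop := out = build_var_map_py_alt lines
instance (lines : List String) (out : List (String × String)) : Decidable (Spec_build_var_map_py lines out) := by unfold Spec_build_var_map_py; infer_instance

-- ===== CLAIM (what is proved, stated in full; the proofs are below) =====
def Claim_equal_build_var_map_py : Prop := ∀ (lines : List String), Dom_build_var_map_py lines → Spec_build_var_map_py lines (build_var_map_py lines)

-- ===== LEMMAS AND PROOFS =====

-- every list of chars is star-free or splits at its first star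
lemma star_decomp (l : List Char) : '*' ∉ l ∨ ∃ t l2, '*' ∉ t ∧ l = t ++ '*' :: l2 := by
  induction l with
  | nil => exact Or.inl (by simp)
  | cons c rest ih =>
    by_cases hc : c = '*'
    · exact Or.inr ⟨[], rest, by simp, by simp [hc]⟩
    · rcases ih with h | ⟨t, l2, ht, hl⟩
      · exact Or.inl (by simp [h]; exact Ne.symm hc)
      · exact Or.inr ⟨c :: t, l2, by simp [ht]; exact Ne.symm hc, by simp [hl]⟩

-- ---- facts about PySem.Chars.splitOn with separator ['*'] ----
lemma splitOn_go_starfree (t : List Char) (ht : '*' ∉ t) :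
    ∀ (fuel : Nat) (cur : List Char) (acc : List (List Char)), t.length < fuel →
    PySem.Chars.splitOn.go ['*'] fuel t cur acc = ((cur.reverse ++ t) :: acc).reverse := by
  induction t with
  | nil =>
    intro fuel cur acc hf
    cases fuel with
    | zero => omega
    | succ m => simp [PySem.Chars.splitOn.go]
  | cons c t' ih =>
    intro fuel cur acc hf
    have hc : ¬ ('*' = c) := fun h => ht (by simp [← h])
    have ht' : '*' ∉ t' := fun h => ht (by simp [h])
    cases fuel with
    | zero => omega
    | succ m =>
      rw [show PySem.Chars.splitOn.go ['*'] (m+1) (c :: t') cur acc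
            = PySem.Chars.splitOn.go ['*'] m t' (c :: cur) acc by
          simp [PySem.Chars.splitOn.go, List.isPrefixOf, hc]]
      rw [ih ht' m (c :: cur) acc (by simp at hf ⊢; omega)]
      simp

lemma splitOn_go_step (t : List Char) (ht : '*' ∉ t) :
    ∀ (l cur : List Char) (acc : List (List Char)) (fuel : Nat),
    PySem.Chars.splitOn.go ['*'] (fuel + t.length + 1) (t ++ '*' :: l) cur acc
      = PySem.Chars.splitOn.go ['*'] fuel l [] ((cur.reverse ++ t) :: acc) := by
  induction t with
  | nil =>
    intro l cur acc fuel
    simp [PySem.Chars.splitOn.go]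
  | cons c t' ih =>
    intro l cur acc fuel
    have hc : ¬ ('*' = c) := fun h => ht (by simp [← h])
    have ht' : '*' ∉ t' := fun h => ht (by simp [h])
    have hlen : fuel + (c :: t').length + 1 = (fuel + t'.length + 1) + 1 := by simp; omega
    rw [hlen, List.cons_append]
    rw [show PySem.Chars.splitOn.go ['*'] ((fuel + t'.length + 1) + 1) (c :: (t' ++ '*' :: l)) cur acc
          = PySem.Chars.splitOn.go ['*'] (fuel + t'.length + 1) (t' ++ '*' :: l) (c :: cur) acc by
        simp [PySem.Chars.splitOn.go, List.isPrefixOf, hc]]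
    rw [ih ht' l (c :: cur) acc fuel]
    simp

lemma splitOn_go_acc (fuel : Nat) :
    ∀ (l cur : List Char) (acc : List (List Char)),
    PySem.Chars.splitOn.go ['*'] fuel l cur acc = acc.reverse ++ PySem.Chars.splitOn.go ['*'] fuel l cur [] := by
  induction fuel with
  | zero => intro l cur acc; simp [PySem.Chars.splitOn.go]
  | succ m ih =>
    intro l cur acc
    cases l with
    | nil => simp [PySem.Chars.splitOn.go]
    | cons c rest =>
      by_cases hc : '*' = c
      · subst hc
        have hstep : ∀ a, PySem.Chars.splitOn.go ['*'] (m+1) ('*' :: rest) cur a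
              = PySem.Chars.splitOn.go ['*'] m rest [] (cur.reverse :: a) := by
          intro a; simp [PySem.Chars.splitOn.go]
        rw [hstep acc, hstep [], ih rest [] (cur.reverse :: acc), ih rest [] [cur.reverse]]
        simp
      · have hstep : ∀ a, PySem.Chars.splitOn.go ['*'] (m+1) (c :: rest) cur a
              = PySem.Chars.splitOn.go ['*'] m rest (c :: cur) a := by
          intro a; simp [PySem.Chars.splitOn.go, List.isPrefixOf, hc]
        rw [hstep acc, hstep []]
        exact ih rest (c :: cur) acc

lemma splitOn_starfree (l : List Char) (h : '*' ∉ l) : PySem.Chars.splitOn l ['*'] = [l] := by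
  rw [PySem.Chars.splitOn, splitOn_go_starfree l h (l.length + 1) [] [] (by omega)]
  simp

lemma splitOn_cons (t l : List Char) (ht : '*' ∉ t) :
    PySem.Chars.splitOn (t ++ '*' :: l) ['*'] = t :: PySem.Chars.splitOn l ['*'] := by
  rw [PySem.Chars.splitOn, PySem.Chars.splitOn,
      show (t ++ '*' :: l).length + 1 = (l.length + 1) + t.length + 1 by simp; omega,
      splitOn_go_step t ht l [] [] (l.length + 1), splitOn_go_acc (l.length + 1) l [] _]
  simp

lemma splitOn_ne_nil (l : List Char) : PySem.Chars.splitOn l ['*'] ≠ [] := by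
  rcases star_decomp l with h | ⟨t, l2, ht, rfl⟩
  · simp [splitOn_starfree l h]
  · simp [splitOn_cons t l2 ht]

-- ---- facts about PySem.Chars.find with pattern ['*'] ----
lemma find_starfree (l : List Char) (h : '*' ∉ l) : PySem.Chars.find l ['*'] = -1 := by
  rw [PySem.Chars.find_eq_neg_one_iff]
  intro hinf
  exact h (hinf.subset (by simp))

lemma find_go_at (t : List Char) (ht : '*' ∉ t) :
    ∀ (l : List Char) (k : Nat), PySem.Chars.find.go ['*'] (t ++ '*' :: l) k = (k + t.length : Int) := by
  induction t with
  | nil => intro l k; simp [PySem.Chars.find.go]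
  | cons c t' ih =>
    intro l k
    have hc : ¬ ('*' = c) := fun h => ht (by simp [← h])
    have ht' : '*' ∉ t' := fun h => ht (by simp [h])
    rw [List.cons_append,
        show PySem.Chars.find.go ['*'] (c :: (t' ++ '*' :: l)) k
          = PySem.Chars.find.go ['*'] (t' ++ '*' :: l) (k + 1) by
        simp [PySem.Chars.find.go, List.isPrefixOf, hc],
        ih ht' l (k + 1)]
    push_cast [List.length_cons]; ring

lemma find_at (t l : List Char) (ht : '*' ∉ t) :
    PySem.Chars.find (t ++ '*' :: l) ['*'] = (t.length : Int) := by
  rw [PySem.Chars.find, find_go_at t ht l 0]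
  simp

-- ---- the scanner ----
lemma scanA_skip (t : List Char) (ht : '*' ∉ t) :
    ∀ (l : List Char) (s : PySem.Set String), scanA (t ++ l) s = scanA l s := by
  induction t with
  | nil => intro l s; simp
  | cons c t' ih =>
    intro l s
    have hc : (c == '*') = false := by
      simp only [beq_eq_false_iff_ne, ne_eq]
      exact fun h => ht (by simp [h])
    have ht' : '*' ∉ t' := fun h => ht (by simp [h])
    rw [List.cons_append, scanA, hc]
    simpa using ih ht' l s

lemma scanA_starfree (l : List Char) (h : '*' ∉ l) (s : PySem.Set String) : scanA l s = s := by
  have := scanA_skip l h [] s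
  simpa [scanA] using this

-- main lemma: the scanner after a '*' equals B's token walk on the split of the remainder
lemma qualA_append (t l2 : List Char) : qualA (t ++ '*' :: l2) = qualB t := by
  cases t with
  | nil => simp [qualA, qualB]; decide
  | cons d t' => simp [qualA, qualB]

lemma take_at (t l2 : List Char) : (t ++ '*' :: l2).take t.length = t := by
  simp

lemma drop_at (t l2 : List Char) : (t ++ '*' :: l2).drop (t.length + 1) = l2 := by
  rw [show t ++ '*' :: l2 = (t ++ ['*']) ++ l2 by simp,
      show t.length + 1 = (t ++ ['*']).length by simp]
  exact List.drop_left

-- one unfolding step of the scanner at a '*'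
lemma scanA_cons_star (l : List Char) (s : PySem.Set String) :
    scanA ('*' :: l) s =
      if qualA l then
        (if PySem.Chars.find l ['*'] == -1 then s
         else scanA (l.drop ((PySem.Chars.find l ['*']).toNat + 1))
                (PySem.Set.add s (String.ofList (l.take (PySem.Chars.find l ['*']).toNat))))
      else scanA l s := by
  rw [scanA]
  simp

-- one unfolding step of the token walk
lemma collectB_cons2 (t u : List Char) (r : List (List Char)) (s : PySem.Set String) :
    collectB (t :: u :: r) s =
      if qualB t then collectB r (PySem.Set.add s (String.ofList t)) else collectB (u :: r) s := by
  rw [collectB]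

lemma scanA_eq_collectB (n : Nat) : ∀ (l : List Char), l.length ≤ n → ∀ (s : PySem.Set String),
    scanA ('*' :: l) s = collectB (PySem.Chars.splitOn l ['*']) s := by
  induction n with
  | zero =>
    intro l hl s
    have : l = [] := List.eq_nil_of_length_eq_zero (Nat.le_zero.mp hl)
    subst this
    rw [splitOn_starfree [] (by simp)]
    simp [scanA, qualA, collectB]
  | succ n ih =>
    intro l hl s
    rcases star_decomp l with hfree | ⟨t, l2, ht, rfl⟩
    · rw [splitOn_starfree l hfree, scanA_cons_star]
      cases hq : qualA l with
      | false => simpa [collectB] using scanA_starfree l hfree s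
      | true => simp [find_starfree l hfree, collectB]
    · rw [scanA_cons_star, qualA_append t l2, splitOn_cons t l2 ht]
      cases hqb : qualB t with
      | false =>
        obtain ⟨u, r, hur⟩ := List.exists_cons_of_ne_nil (splitOn_ne_nil l2)
        rw [hur, collectB_cons2, hqb]
        simp only [Bool.false_eq_true, if_false]
        rw [scanA_skip t ht ('*' :: l2) s, ← hur]
        refine ih l2 ?_ s
        simp only [List.length_append, List.length_cons] at hl
        omega
      | true =>
        rw [find_at t l2 ht]
        simp only [if_true,
          show (((t.length : Int)) == -1) = false by simp, Bool.false_eq_true, if_false,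
          Int.toNat_natCast, take_at, drop_at]
        rcases star_decomp l2 with h2 | ⟨u, l3, hu, rfl⟩
        · rw [splitOn_starfree l2 h2, collectB_cons2, hqb]
          simpa [collectB] using scanA_starfree l2 h2 (PySem.Set.add s (String.ofList t))
        · rw [splitOn_cons u l3 hu, collectB_cons2, hqb]
          simp only [if_true]
          rw [scanA_skip u hu ('*' :: l3) _]
          refine ih l3 ?_ _
          simp only [List.length_append, List.length_cons] at hl
          omega

lemma scan_line_eq (cs : List Char) (s : PySem.Set String) :
    scanA cs s = (match PySem.Chars.splitOn cs ['*'] with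
                  | [] => s
                  | _ :: cands => collectB cands s) := by
  rcases star_decomp cs with h | ⟨t, l, ht, rfl⟩
  · rw [splitOn_starfree cs h, scanA_starfree cs h s]
    simp [collectB]
  · rw [splitOn_cons t l ht, scanA_skip t ht ('*' :: l) s]
    exact scanA_eq_collectB l.length l le_rfl s

-- ===== VERDICT (by name: the statement is the Claim_ definition above) =====
theorem build_var_map_py_spec : Claim_equal_build_var_map_py := by
  intro lines hDom
  clear hDom
  unfold Spec_build_var_map_py build_var_map_py build_var_map_py_alt
  simp only []
  rw [show ∀ s, lines.foldl (fun vars line => scanA line.toList vars) s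
        = lines.foldl (fun s line =>
            match PySem.Chars.splitOn line.toList ['*'] with
            | [] => s
            | _ :: cands => collectB cands s) s by
      induction lines with
      | nil => intro s; rfl
      | cons hd tl ih =>
        intro s
        simp only [List.foldl_cons]
        rw [scan_line_eq hd.toList s]
        apply ih]
  generalize (lines.foldl (fun s line =>
      match PySem.Chars.splitOn line.toList ['*'] with
      | [] => s
      | _ :: cands => collectB cands s) PySem.Set.empty) = V
  refine congrArg PySem.Dict.items (PySem.List.foldl_congr_mem _ _ _ _ ?_)
  intro d p hp
  rw [PySem.List.mem_enumerate_iff] at hp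
  obtain ⟨k, hk, rfl⟩ := hp
  rw [PySem.List.length_sorted] at hk
  simp only [zero_add]
  have hlen26 : ((List.range 26).map (fun j => String.ofList [Char.ofNat (97 + j)])).length = 26 := by
    simp
  by_cases h26 : PySem.Set.len V > 26
  · have hn : 26 < V.length := by simpa [PySem.Set.len] using h26
    have hto : ((PySem.Set.len V) - 26).toNat = V.length - 26 := by
      simp [PySem.Set.len]; omega
    rw [if_pos h26, hto]
    rw [if_pos (by
      simp only [List.length_append, List.length_map, List.length_range, hlen26]
      push_cast
      omega)]
    rw [PySem.List.pyGetD_natCast]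
    by_cases hk26 : k < 26
    · rw [List.getD_append _ _ _ k (by rw [hlen26]; exact hk26),
          PySem.List.getD_map_range _ _ _ _ hk26]
      rw [shortB, if_pos (by exact_mod_cast hk26),
          show ((97 : Int) + (k : Int)).toNat = 97 + k by omega]
    · rw [List.getD_append_right _ _ _ k (by rw [hlen26]; omega), hlen26,
          PySem.List.getD_map_range _ _ _ _ (by omega)]
      rw [shortB, if_neg (by omega),
          show ((97 : Int) + (k : Int) - 26).toNat = 97 + (k - 26) by omega]
  · have hn : V.length ≤ 26 := by simp [PySem.Set.len] at h26; omega
    have hk26 : k < 26 := by omega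
    rw [if_neg h26]
    rw [if_pos (by rw [hlen26]; exact_mod_cast hk26)]
    rw [PySem.List.pyGetD_natCast, PySem.List.getD_map_range _ _ _ _ hk26]
    rw [shortB, if_pos (by exact_mod_cast hk26),
        show ((97 : Int) + (k : Int)).toNat = 97 + k by omega]
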